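-- pv_equiv track=rewrite | github.com/dvc0310/Interview-prep-stuff | anki/mostwater.py | longest_true_word
-- ===== SOURCE A (Python) =====
-- def longest_true_word(dictionary):
--     max_length = 0
--     longest_word = ""
--
--     for word, flag in dictionary.items():
--         if flag is True and len(word) > max_length:
--             max_length = len(word)
--             longest_word = word
--
--     return longest_word
-- ===== SOURCE B (Python) =====
-- def longest_true_word(dictionary):
--     # sort items by descending word length (stable), return first flagged word
--     for word, flag in sorted(dictionary.items(), key=lambda kv: len(kv[0]), reverse=True):
--         if flag is True:
--             return word
--     return ""
-- ===== Notes on version B (the rewrite author's own statement) =====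
-- stated objective: alternative
-- what changed: Replaces A's single-pass running-max scan with a stable sort of the items by descending word length followed by a first-match scan for a True flag.
import Mathlib
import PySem

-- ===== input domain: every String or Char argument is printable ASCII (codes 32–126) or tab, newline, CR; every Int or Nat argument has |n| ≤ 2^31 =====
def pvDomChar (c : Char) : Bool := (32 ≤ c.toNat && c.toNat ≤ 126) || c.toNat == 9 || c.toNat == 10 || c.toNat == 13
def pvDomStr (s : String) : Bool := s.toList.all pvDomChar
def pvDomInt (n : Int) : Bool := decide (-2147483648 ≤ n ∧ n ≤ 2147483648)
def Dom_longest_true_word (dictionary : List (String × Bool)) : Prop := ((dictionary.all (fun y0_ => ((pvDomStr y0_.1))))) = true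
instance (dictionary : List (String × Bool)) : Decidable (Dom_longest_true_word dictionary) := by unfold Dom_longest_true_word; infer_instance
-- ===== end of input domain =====

-- B sorts the items by descending word length (stable) and returns the first word whose
-- flag is true; A is a one-pass running-max scan. Alternative algorithm, same values.

-- ===== PORT A =====
def longest_true_word (dictionary : List (String × Bool)) : String :=
  (dictionary.foldl
    (fun st kv =>
      if kv.2 = true ∧ st.1 < PySem.Str.len kv.1 then (PySem.Str.len kv.1, kv.1) else st)
    ((0 : Int), "")).2

-- ===== PORT B =====
-- the 'for … : if flag is True: return word / return ""' loop of Source B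
def pvFirstTrue : List (String × Bool) → String
  | [] => ""
  | kv :: rest => if kv.2 then kv.1 else pvFirstTrue rest

def longest_true_word_alt (dictionary : List (String × Bool)) : String :=
  pvFirstTrue (PySem.List.sorted dictionary (fun kv => PySem.Str.len kv.1) true)

-- ===== PRECONDITION & SPEC =====
def Spec_longest_true_word (dictionary : List (String × Bool)) (out : String) : Prop := out = longest_true_word_alt dictionary
instance (dictionary : List (String × Bool)) (out : String) : Decidable (Spec_longest_true_word dictionary out) := by unfold Spec_longest_true_word; infer_instance

-- ===== CLAIM (what is proved, stated in full; the proofs are below) =====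
def Claim_equal_longest_true_word : Prop := ∀ (dictionary : List (String × Bool)), Dom_longest_true_word dictionary → Spec_longest_true_word dictionary (longest_true_word dictionary)

-- ===== LEMMAS AND PROOFS =====

-- descending word length, the order B's sort establishes
def pvDesc (l : List (String × Bool)) : Prop :=
  l.Pairwise (fun a b => PySem.Str.len b.1 ≤ PySem.Str.len a.1)

-- the insertion step of PySem's stable reverse sort with key = word length
def pvIns (x : String × Bool) (acc : List (String × Bool)) : List (String × Bool) :=
  PySem.List.insertBy (fun a b => decide (PySem.Str.len b.1 < PySem.Str.len a.1)) x acc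

lemma pvFirstTrue_eq_find? (l : List (String × Bool)) :
    pvFirstTrue l = ((l.find? (fun kv => kv.2)).map (·.1)).getD "" := by
  induction l with
  | nil => rfl
  | cons kv rest ih =>
    by_cases h : kv.2 = true <;> simp [pvFirstTrue, List.find?, h, ih]

lemma pvIns_cons_of_lt (x y : String × Bool) (ys : List (String × Bool))
    (hb : PySem.Str.len y.1 < PySem.Str.len x.1) :
    pvIns x (y :: ys) = x :: y :: ys := by
  unfold pvIns PySem.List.insertBy
  rw [decide_eq_true hb]
  rfl

lemma pvIns_cons_of_ge (x y : String × Bool) (ys : List (String × Bool))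
    (hb : ¬ PySem.Str.len y.1 < PySem.Str.len x.1) :
    pvIns x (y :: ys) = y :: pvIns x ys := by
  conv_lhs => unfold pvIns PySem.List.insertBy
  rw [decide_eq_false hb]
  rfl

lemma pvIns_desc (x : String × Bool) (acc : List (String × Bool)) (h : pvDesc acc) :
    pvDesc (pvIns x acc) := by
  induction acc with
  | nil =>
    unfold pvIns PySem.List.insertBy
    simp [pvDesc]
  | cons y ys ih =>
    rcases List.pairwise_cons.mp h with ⟨hy, hys⟩
    by_cases hb : PySem.Str.len y.1 < PySem.Str.len x.1
    · rw [pvIns_cons_of_lt x y ys hb]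
      refine List.pairwise_cons.mpr ⟨?_, h⟩
      intro z hz
      rcases List.mem_cons.mp hz with rfl | hz
      · omega
      · have := hy z hz; omega
    · rw [pvIns_cons_of_ge x y ys hb]
      refine List.pairwise_cons.mpr ⟨?_, ih hys⟩
      intro z hz
      rcases (PySem.List.mem_insertBy _ _ _ _).mp hz with rfl | hz
      · omega
      · exact hy z hz

lemma find?_pvIns (x : String × Bool) (acc : List (String × Bool)) (h : pvDesc acc) :
    (pvIns x acc).find? (fun kv => kv.2) =
      if x.2 then
        match acc.find? (fun kv => kv.2) with
        | some t => if PySem.Str.len t.1 < PySem.Str.len x.1 then some x else some t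
        | none => some x
      else acc.find? (fun kv => kv.2) := by
  induction acc with
  | nil =>
    unfold pvIns PySem.List.insertBy
    by_cases hx : x.2 = true <;> simp [List.find?, hx]
  | cons y ys ih =>
    rcases List.pairwise_cons.mp h with ⟨hy, hys⟩
    by_cases hb : PySem.Str.len y.1 < PySem.Str.len x.1
    · -- x is placed in front of y :: ys
      rw [pvIns_cons_of_lt x y ys hb]
      by_cases hx : x.2 = true
      · rw [List.find?_cons_of_pos (by simpa using hx), if_pos hx]
        cases hfy : (y :: ys).find? (fun kv => kv.2) with
        | none => rfl
        | some t =>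
          have ht : t ∈ y :: ys := List.mem_of_find?_eq_some hfy
          have hlen : PySem.Str.len t.1 < PySem.Str.len x.1 := by
            rcases List.mem_cons.mp ht with rfl | ht
            · exact hb
            · have := hy t ht; omega
          show some x = if PySem.Str.len t.1 < PySem.Str.len x.1 then some x else some t
          rw [if_pos hlen]
      · rw [List.find?_cons_of_neg (by simpa using hx), if_neg hx]
    · -- x is inserted behind y
      rw [pvIns_cons_of_ge x y ys hb]
      by_cases hyt : y.2 = true
      · rw [List.find?_cons_of_pos (by simpa using hyt),
            List.find?_cons_of_pos (by simpa using hyt)]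
        by_cases hx : x.2 = true
        · rw [if_pos hx]
          show some y = if PySem.Str.len y.1 < PySem.Str.len x.1 then some x else some y
          rw [if_neg hb]
        · rw [if_neg hx]
      · rw [List.find?_cons_of_neg (by simpa using hyt),
            List.find?_cons_of_neg (by simpa using hyt)]
        exact ih hys

-- coupling invariant between A's running state (m, w) and the sorted accumulator
def pvInv (acc : List (String × Bool)) (m : Int) (w : String) : Prop :=
  pvDesc acc ∧
    ((acc.find? (fun kv => kv.2) = none ∧ m = 0 ∧ w = "") ∨
     (∃ t, acc.find? (fun kv => kv.2) = some t ∧ m = PySem.Str.len t.1 ∧ w = t.1))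

lemma pv_len_nonneg (s : String) : 0 ≤ PySem.Str.len s := by
  simp [PySem.Str.len_eq]

lemma pv_len_zero (s : String) (h : PySem.Str.len s = 0) : s = "" := by
  rw [PySem.Str.len_eq] at h
  have : s.toList = [] := by
    have := List.length_eq_zero_iff.mp (by exact_mod_cast h)
    exact this
  exact String.toList_eq_nil_iff.mp this

lemma pv_main (d acc : List (String × Bool)) (m : Int) (w : String)
    (h : pvInv acc m w) :
    (d.foldl
      (fun st kv =>
        if kv.2 = true ∧ st.1 < PySem.Str.len kv.1 then (PySem.Str.len kv.1, kv.1) else st)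
      (m, w)).2
      = pvFirstTrue (d.foldl (fun acc x => pvIns x acc) acc) := by
  induction d generalizing acc m w with
  | nil =>
    rcases h with ⟨-, ⟨hf, hm, hw⟩ | ⟨t, hf, hm, hw⟩⟩ <;>
      simp [pvFirstTrue_eq_find?, hf, hw]
  | cons x d ih =>
    simp only [List.foldl_cons]
    have hdesc := (h.1)
    have hdesc' := pvIns_desc x acc hdesc
    have hfind := find?_pvIns x acc hdesc
    by_cases hx : x.2 = true
    · rcases h with ⟨-, ⟨hf, hm, hw⟩ | ⟨t, hf, hm, hw⟩⟩
      · -- no true entry yet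
        rw [hf] at hfind
        simp only [hx, if_true] at hfind
        by_cases hpos : m < PySem.Str.len x.1
        · rw [if_pos ⟨hx, hpos⟩]
          exact ih _ _ _ ⟨hdesc', Or.inr ⟨x, hfind, rfl, rfl⟩⟩
        · have h0 : PySem.Str.len x.1 = 0 := by
            have := pv_len_nonneg x.1; omega
          rw [if_neg (by tauto)]
          exact ih _ _ _ ⟨hdesc', Or.inr ⟨x, hfind, by omega, by rw [hw, pv_len_zero _ h0]⟩⟩
      · rw [hf] at hfind
        simp only [hx, if_true] at hfind
        by_cases hlt : PySem.Str.len t.1 < PySem.Str.len x.1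
        · rw [if_pos ⟨hx, by omega⟩]
          rw [if_pos hlt] at hfind
          exact ih _ _ _ ⟨hdesc', Or.inr ⟨x, hfind, rfl, rfl⟩⟩
        · rw [if_neg (by rw [hm]; tauto)]
          rw [if_neg hlt] at hfind
          exact ih _ _ _ ⟨hdesc', Or.inr ⟨t, hfind, hm, hw⟩⟩
    · rw [if_neg (by tauto)]
      rw [if_neg (by simp [hx])] at hfind
      refine ih _ _ _ ⟨hdesc', ?_⟩
      rcases h with ⟨-, ⟨hf, hm, hw⟩ | ⟨t, hf, hm, hw⟩⟩
      · exact Or.inl ⟨hfind.trans hf, hm, hw⟩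
      · exact Or.inr ⟨t, hfind.trans hf, hm, hw⟩

-- ===== VERDICT (by name: the statement is the Claim_ definition above) =====
theorem longest_true_word_spec : Claim_equal_longest_true_word := by
  intro d _
  unfold Spec_longest_true_word longest_true_word longest_true_word_alt
  rw [PySem.List.sorted_rev_eq_foldl_insertBy]
  exact pv_main d [] 0 "" ⟨List.Pairwise.nil, Or.inl ⟨rfl, rfl, rfl⟩⟩
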